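-- pv_equiv track=rewrite | github.com/jayPreak/dsa | hackerrank/mar18/acceptablemessage.py | is_acceptable
-- ===== SOURCE A (Python) =====
-- def is_acceptable(s, m):
--     count_0 = s.count('0')
--     count_1 = s.count('1')
--     count_q = s.count('?')
--     if abs(count_0 - count_1) > count_q:
--         return False
--
--     for i in range(len(s) - m + 1):
--         sub = s[i:i+m]
--         sub_count_0 = sub.count('0')
--         sub_count_1 = sub.count('1')
--         sub_count_q = sub.count('?')
--         if abs(sub_count_0 - sub_count_1) > sub_count_q:
--             return False
--         remaining_q = sub_count_q - abs(sub_count_0 - sub_count_1)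
--         if remaining_q % 2 == 1:
--             return False
--         if i > 0 and s[i-1] == '?' and sub_count_0 > sub_count_1:
--             count_0 += remaining_q // 2
--             count_1 += remaining_q // 2 + remaining_q % 2
--         elif i > 0 and s[i-1] == '?' and sub_count_1 > sub_count_0:
--             count_0 += remaining_q // 2 + remaining_q % 2
--             count_1 += remaining_q // 2
--         if count_0 < count_1 - remaining_q or count_1 < count_0 - remaining_q:
--             return False
--
--     return True
-- ===== SOURCE B (Python) =====
-- def is_acceptable(s, m):
--     c0 = s.count('0')
--     c1 = s.count('1')
--     cq = s.count('?')
--     if abs(c0 - c1) > cq: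
--         return False
--
--     total = len(s) - m + 1
--     w = s[0:m]
--     w0 = w.count('0')
--     w1 = w.count('1')
--     wq = w.count('?')
--     for i in range(total):
--         d = abs(w0 - w1)
--         if d > wq:
--             return False
--         r = wq - d
--         if r % 2 == 1:
--             return False
--         if i > 0 and s[i - 1] == '?' and w0 != w1:
--             c0 += r // 2
--             c1 += r // 2
--         if c0 < c1 - r or c1 < c0 - r:
--             return False
--         if i + 1 < total:
--             ch = s[i]
--             if ch == '0':
--                 w0 -= 1
--             elif ch == '1':
--                 w1 -= 1
--             elif ch == '?':
--                 wq -= 1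
--             ch = s[i + m]
--             if ch == '0':
--                 w0 += 1
--             elif ch == '1':
--                 w1 += 1
--             elif ch == '?':
--                 wq += 1
--     return True
-- ===== Notes on version B (the rewrite author's own statement) =====
-- stated objective: faster
-- what changed: B maintains the window counts of '0'/'1'/'?' incrementally (subtract the character leaving, add the character entering) instead of A's recount of the slice s[i:i+m] at every index, and folds A's two always-equal count-update branches (remaining_q is even there) into one.
-- outside the precondition, e.g. on is_acceptable('??0??', -1): A returns False, B raises IndexError; on is_acceptable('0?11', -1): A returns False, B returns False
import Mathlib
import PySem

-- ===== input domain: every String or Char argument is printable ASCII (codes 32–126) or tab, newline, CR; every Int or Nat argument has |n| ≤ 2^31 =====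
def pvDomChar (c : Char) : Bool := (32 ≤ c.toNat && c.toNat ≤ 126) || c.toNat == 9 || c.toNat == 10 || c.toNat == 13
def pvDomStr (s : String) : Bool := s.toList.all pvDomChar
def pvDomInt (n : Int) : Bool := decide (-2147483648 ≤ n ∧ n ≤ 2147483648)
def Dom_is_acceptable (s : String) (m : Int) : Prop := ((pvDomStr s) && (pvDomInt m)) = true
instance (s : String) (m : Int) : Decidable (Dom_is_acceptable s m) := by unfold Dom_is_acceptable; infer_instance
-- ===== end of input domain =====

-- B replaces A's per-window recount of s[i:i+m] by incrementally maintained sliding-window counts; return value only (no mutation in either program).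

-- ===== PORT A =====
-- A's loop: at each index i, recount '0'/'1'/'?' in the slice s[i:i+m]
def pvLoopA (l : List Char) (m : Int) : List Int → Int → Int → Bool
  | [], _, _ => true
  | i :: rest, c0, c1 =>
    let sub := PySem.List.slice l (some i) (some (i + m))
    let s0 : Int := (PySem.Chars.count sub ['0'] : Int)
    let s1 : Int := (PySem.Chars.count sub ['1'] : Int)
    let sq : Int := (PySem.Chars.count sub ['?'] : Int)
    if |s0 - s1| > sq then false
    else
      let r := sq - |s0 - s1|
      if PySem.Int.mod r 2 == 1 then false
      else
        let p := decide (0 < i) && (PySem.List.pyGet? l (i - 1) == some '?')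
        let c : Int × Int :=
          if p && decide (s1 < s0) then
            (c0 + PySem.Int.floordiv r 2, c1 + (PySem.Int.floordiv r 2 + PySem.Int.mod r 2))
          else if p && decide (s0 < s1) then
            (c0 + (PySem.Int.floordiv r 2 + PySem.Int.mod r 2), c1 + PySem.Int.floordiv r 2)
          else (c0, c1)
        if c.1 < c.2 - r || c.2 < c.1 - r then false
        else pvLoopA l m rest c.1 c.2


def is_acceptable (s : String) (m : Int) : Bool :=
  let l := s.toList
  let c0 : Int := (PySem.Chars.count l ['0'] : Int)
  let c1 : Int := (PySem.Chars.count l ['1'] : Int)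
  let cq : Int := (PySem.Chars.count l ['?'] : Int)
  if |c0 - c1| > cq then false
  else pvLoopA l m (PySem.List.pyRange 0 (PySem.List.len l - m + 1) 1) c0 c1

-- ===== PORT B =====
-- B's loop: the window counts w0/w1/wq are slid by one position at the end of each iteration
def pvLoopB (l : List Char) (m total : Int) : List Int → Int → Int → Int → Int → Int → Bool
  | [], _, _, _, _, _ => true
  | i :: rest, c0, c1, w0, w1, wq =>
    let d := |w0 - w1|
    if d > wq then false
    else
      let r := wq - d
      if PySem.Int.mod r 2 == 1 then false
      else
        let c : Int × Int :=
          if decide (0 < i) && (PySem.List.pyGet? l (i - 1) == some '?') && decide (w0 ≠ w1) then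
            (c0 + PySem.Int.floordiv r 2, c1 + PySem.Int.floordiv r 2)
          else (c0, c1)
        if c.1 < c.2 - r || c.2 < c.1 - r then false
        else if i + 1 < total then
          let ch := PySem.List.pyGet? l i
          let w : Int × Int × Int :=
            if ch == some '0' then (w0 - 1, w1, wq)
            else if ch == some '1' then (w0, w1 - 1, wq)
            else if ch == some '?' then (w0, w1, wq - 1)
            else (w0, w1, wq)
          let ch2 := PySem.List.pyGet? l (i + m)
          let w' : Int × Int × Int :=
            if ch2 == some '0' then (w.1 + 1, w.2.1, w.2.2)
            else if ch2 == some '1' then (w.1, w.2.1 + 1, w.2.2)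
            else if ch2 == some '?' then (w.1, w.2.1, w.2.2 + 1)
            else (w.1, w.2.1, w.2.2)
          pvLoopB l m total rest c.1 c.2 w'.1 w'.2.1 w'.2.2
        else pvLoopB l m total rest c.1 c.2 w0 w1 wq


def is_acceptable_alt (s : String) (m : Int) : Bool :=
  let l := s.toList
  let c0 : Int := (PySem.Chars.count l ['0'] : Int)
  let c1 : Int := (PySem.Chars.count l ['1'] : Int)
  let cq : Int := (PySem.Chars.count l ['?'] : Int)
  if |c0 - c1| > cq then false
  else
    let total := PySem.List.len l - m + 1
    let w := PySem.List.slice l (some 0) (some m)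
    pvLoopB l m total (PySem.List.pyRange 0 total 1) c0 c1
      ((PySem.Chars.count w ['0'] : Int)) ((PySem.Chars.count w ['1'] : Int))
      ((PySem.Chars.count w ['?'] : Int))

-- ===== PRECONDITION & SPEC =====
-- Pre_ admits every m ≥ 0 (the natural domain of a window length) and, for negative m, the
-- inputs the global balance check rejects at once; on the remaining negative-m inputs A either
-- raises IndexError at s[i-1] or returns False through shrinking negative-slice windows that
-- B's natural sliding loop does not follow (B raises IndexError there or stops earlier).
def Pre_is_acceptable (s : String) (m : Int) : Prop :=
  0 ≤ m ∨
    |(PySem.Chars.count s.toList ['0'] : Int) - (PySem.Chars.count s.toList ['1'] : Int)| >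
      (PySem.Chars.count s.toList ['?'] : Int)
instance (s : String) (m : Int) : Decidable (Pre_is_acceptable s m) := by
  unfold Pre_is_acceptable; infer_instance

def pvWitness_is_acceptable : String × Int := ("0?1?", 2)

def Spec_is_acceptable (s : String) (m : Int) (out : Bool) : Prop := out = is_acceptable_alt s m
instance (s : String) (m : Int) (out : Bool) : Decidable (Spec_is_acceptable s m out) := by
  unfold Spec_is_acceptable; infer_instance

-- ===== CLAIM (what is proved, stated in full; the proofs are below) =====
def Claim_equal_is_acceptable : Prop := ∀ (s : String) (m : Int), Dom_is_acceptable s m → Pre_is_acceptable s m → Spec_is_acceptable s m (is_acceptable s m)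

-- ===== LEMMAS AND PROOFS =====

-- Python str.count of a single character is List.count
theorem pvCount_go_singleton (c : Char) (fuel : Nat) (s : List Char) (acc : Nat)
    (h : s.length ≤ fuel) : PySem.Chars.count.go [c] fuel s acc = acc + s.count c := by
  induction fuel generalizing s acc with
  | zero =>
    interval_cases hl : s.length
    · simp_all [List.length_eq_zero_iff.mp hl, PySem.Chars.count.go]
  | succ n ih =>
    cases s with
    | nil => simp [PySem.Chars.count.go]
    | cons a t =>
      by_cases hac : a = c
      · subst hac
        simp [PySem.Chars.count.go, List.isPrefixOf, ih t (acc + 1) (by simpa using h)]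
        omega
      · simp [PySem.Chars.count.go, List.isPrefixOf, hac, Ne.symm hac,
          ih t acc (by simpa using h)]

theorem pvCount_singleton (s : List Char) (c : Char) :
    PySem.Chars.count s [c] = s.count c := by
  simp [PySem.Chars.count, pvCount_go_singleton c s.length s 0 le_rfl]

-- the window of length m at index i
def pvWin (l : List Char) (m : Int) (i : Nat) : List Char := (l.drop i).take m.toNat


theorem pvSlice_win (l : List Char) (m i : Int) (hm : 0 ≤ m) (hi : 0 ≤ i) :
    PySem.List.slice l (some i) (some (i + m)) = pvWin l m i.toNat := by
  rw [PySem.List.slice_toNat l hi (by omega)]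
  unfold pvWin
  congr 1
  omega

-- sliding the window one step to the right
theorem pvWin_succ_count (l : List Char) (m : Int) (i : Nat) (c : Char)
    (h : i + m.toNat < l.length) :
    ((pvWin l m (i + 1)).count c : Int) =
      ((pvWin l m i).count c : Int)
        - (if l[i]'(by omega) = c then 1 else 0)
        + (if l[i + m.toNat]'h = c then 1 else 0) := by
  by_cases hmt : m.toNat = 0
  · simp only [pvWin, hmt, List.take_zero, Nat.add_zero, List.count_nil]
    simp
  · obtain ⟨t, ht⟩ : ∃ t, m.toNat = t + 1 := ⟨m.toNat - 1, by omega⟩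
    have hi : i < l.length := by omega
    have hit : i + (t + 1) < l.length := by omega
    have h1 : pvWin l m i = l[i]'hi :: (l.drop (i + 1)).take t := by
      rw [pvWin, ht, List.drop_eq_getElem_cons hi]
      rfl
    have h2 : pvWin l m (i + 1) = (l.drop (i + 1)).take t ++ [l[i + (t + 1)]'hit] := by
      rw [pvWin, ht, List.take_add_one, List.getElem?_drop,
        List.getElem?_eq_getElem (show i + 1 + t < l.length by omega)]
      simp
      congr 1
      omega
    simp only [ht] at h ⊢
    rw [h1, h2, List.count_append, List.count_cons]
    by_cases e1 : l[i]'hi = c <;> by_cases e2 : l[i + (t + 1)]'hit = c <;>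
      simp_all [beq_iff_eq]

-- the two loops agree; invariant: the w-arguments are the counts of the window at i
set_option maxHeartbeats 1000000 in
theorem pvLoop_eq (l : List Char) (m : Int) (hm : 0 ≤ m) :
    ∀ (k : Nat) (i c0 c1 : Int), 0 ≤ i →
      ((PySem.List.len l - m + 1) - i).toNat = k →
      pvLoopA l m (PySem.List.pyRange i (PySem.List.len l - m + 1) 1) c0 c1 =
        pvLoopB l m (PySem.List.len l - m + 1)
          (PySem.List.pyRange i (PySem.List.len l - m + 1) 1) c0 c1
          ((pvWin l m i.toNat).count '0' : Int) ((pvWin l m i.toNat).count '1' : Int)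
          ((pvWin l m i.toNat).count '?' : Int) := by
  intro k
  induction k with
  | zero =>
    intro i c0 c1 hi hk
    rw [PySem.List.pyRange_one_eq_nil (by simp only [PySem.List.len_eq] at hk ⊢; omega)]
    rfl
  | succ n ih =>
    intro i c0 c1 hi hk
    have hlen : PySem.List.len l = (l.length : Int) := PySem.List.len_eq l
    have hiT : i < PySem.List.len l - m + 1 := by rw [hlen] at hk ⊢; omega
    rw [PySem.List.pyRange_one_cons hiT]
    simp only [pvLoopA, pvLoopB, pvSlice_win l m i hm hi, pvCount_singleton]
    set a0 : Int := ((pvWin l m i.toNat).count '0' : Int) with ha0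
    set a1 : Int := ((pvWin l m i.toNat).count '1' : Int) with ha1
    set aq : Int := ((pvWin l m i.toNat).count '?' : Int) with haq
    by_cases hgt : |a0 - a1| > aq
    · rw [if_pos hgt, if_pos hgt]
    · rw [if_neg hgt, if_neg hgt]
      set r : Int := aq - |a0 - a1| with hr
      by_cases hpar : (PySem.Int.mod r 2 == 1) = true
      · rw [if_pos hpar, if_pos hpar]
      · rw [if_neg hpar, if_neg hpar]
        have hr0 : PySem.Int.mod r 2 = 0 := by
          have he : PySem.Int.mod r 2 = r % 2 := PySem.Int.mod_eq_emod_of_pos (by omega)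
          simp only [beq_iff_eq] at hpar
          omega
        set p : Bool := decide (0 < i) && (PySem.List.pyGet? l (i - 1) == some '?') with hp
        have hpair :
            (if p && decide (a1 < a0) then
              (c0 + PySem.Int.floordiv r 2, c1 + (PySem.Int.floordiv r 2 + PySem.Int.mod r 2))
            else if p && decide (a0 < a1) then
              (c0 + (PySem.Int.floordiv r 2 + PySem.Int.mod r 2), c1 + PySem.Int.floordiv r 2)
            else (c0, c1)) =
            (if p && decide (a0 ≠ a1) then
              (c0 + PySem.Int.floordiv r 2, c1 + PySem.Int.floordiv r 2)
            else (c0, c1)) := by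
          rw [hr0]
          cases p with
          | false => simp
          | true =>
            rcases lt_trichotomy a0 a1 with h | h | h
            · simp [h, ne_of_lt h]
            · simp [h]
            · simp [h, ne_of_gt h]
        rw [hpair]
        set c : Int × Int :=
          (if p && decide (a0 ≠ a1) then
            (c0 + PySem.Int.floordiv r 2, c1 + PySem.Int.floordiv r 2)
          else (c0, c1)) with hc
        by_cases hfin : (c.1 < c.2 - r || c.2 < c.1 - r) = true
        · rw [if_pos hfin, if_pos hfin]
        · rw [if_neg hfin, if_neg hfin]
          by_cases hnext : i + 1 < PySem.List.len l - m + 1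
          · rw [if_pos hnext]
            have hi1 : i < (l.length : Int) := by rw [hlen] at hnext; omega
            have him : i + m < (l.length : Int) := by rw [hlen] at hnext; omega
            have hg1 : PySem.List.pyGet? l i = some (l[i.toNat]'(by omega)) :=
              PySem.List.pyGet?_eq_some_getElem l hi (by omega)
            have hg2 : PySem.List.pyGet? l (i + m) = some (l[(i + m).toNat]'(by omega)) :=
              PySem.List.pyGet?_eq_some_getElem l (by omega) (by omega)
            rw [hg1, hg2]
            have hsucc : (i + 1).toNat = i.toNat + 1 := by omega
            have hih := ih (i + 1) c.1 c.2 (by omega) (by rw [hlen] at hk ⊢; omega)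
            rw [hih, hsucc]
            have hwin : i.toNat + m.toNat < l.length := by omega
            have hidx : (i + m).toNat = i.toNat + m.toNat := by omega
            have e0 := pvWin_succ_count l m i.toNat '0' hwin
            have e1 := pvWin_succ_count l m i.toNat '1' hwin
            have eq := pvWin_succ_count l m i.toNat '?' hwin
            rw [ha0, ha1, haq]
            simp only [hidx, beq_iff_eq, Option.some.injEq]
            rw [e0, e1, eq]
            have key : ∀ (x0 x1 x2 y0 y1 y2 : Int), x0 = y0 → x1 = y1 → x2 = y2 →
                pvLoopB l m (PySem.List.len l - m + 1)
                  (PySem.List.pyRange (i + 1) (PySem.List.len l - m + 1) 1) c.1 c.2 x0 x1 x2 =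
                pvLoopB l m (PySem.List.len l - m + 1)
                  (PySem.List.pyRange (i + 1) (PySem.List.len l - m + 1) 1) c.1 c.2 y0 y1 y2 := by
              intro _ _ _ _ _ _ h1 h2 h3
              rw [h1, h2, h3]
            clear ih hih hpair hfin hpar hgt hk hg1 hg2 hc hp hr
            refine key _ _ _ _ _ _ ?_ ?_ ?_ <;>
              split_ifs <;> dsimp only <;> first | omega | simp_all only [Char.reduceEq]
          · rw [if_neg hnext]
            rw [PySem.List.pyRange_one_eq_nil (by omega)]
            rfl


theorem pvTop (s : String) (m : Int)
    (hpre : 0 ≤ m ∨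
      |(PySem.Chars.count s.toList ['0'] : Int) - (PySem.Chars.count s.toList ['1'] : Int)| >
        (PySem.Chars.count s.toList ['?'] : Int)) :
    is_acceptable s m = is_acceptable_alt s m := by
  unfold is_acceptable is_acceptable_alt
  simp only []
  by_cases hgt : |(PySem.Chars.count s.toList ['0'] : Int) - (PySem.Chars.count s.toList ['1'] : Int)| > (PySem.Chars.count s.toList ['?'] : Int)
  · rw [if_pos hgt, if_pos hgt]
  · have hm : 0 ≤ m := hpre.resolve_right hgt
    rw [if_neg hgt, if_neg hgt]
    have h0 : PySem.List.slice s.toList (some 0) (some m) = pvWin s.toList m 0 := by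
      have h := pvSlice_win s.toList m 0 hm le_rfl
      simpa using h
    rw [h0]
    have := pvLoop_eq s.toList m hm ((PySem.List.len s.toList - m + 1) - 0).toNat 0
      ((PySem.Chars.count s.toList ['0'] : Int)) ((PySem.Chars.count s.toList ['1'] : Int)) le_rfl rfl
    simpa [pvCount_singleton] using this

-- ===== VERDICT (by name: the statement is the Claim_ definition above) =====
theorem is_acceptable_spec : Claim_equal_is_acceptable := by
  intro s m _ hpre
  exact pvTop s m hpre
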